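-- pv_equiv track=rewrite | github.com/ColineUVSQ/RNA_A_minor | draw_like_carnaval.py | rang_sim
-- ===== SOURCE A (Python) =====
-- from collections import OrderedDict
--
-- def rang_sim(dico_sim, sim):
--     dico_sim_sorted = OrderedDict(sorted(dico_sim.items(), key= lambda t: t[1], reverse=True))
--
--     etape = 1
--     rang = 0
--     for elt in dico_sim_sorted.values() :
--         if elt == sim :
--             rang = etape
--         etape += 1
--
--     return rang
-- ===== SOURCE B (Python) =====
-- def rang_sim(dico_sim, sim):
--     greater = 0
--     equal = 0
--     for v in dico_sim.values():
--         if v > sim: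
--             greater += 1
--         elif v == sim:
--             equal += 1
--     return greater + equal if equal else 0
-- ===== Notes on version B (the rewrite author's own statement) =====
-- stated objective: faster
-- what changed: Replaces the sort-then-scan (sort values descending, remember the last position equal to sim) by a single counting pass: rank = (#values > sim) + (#values == sim), or 0 if none equal.
import Mathlib
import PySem

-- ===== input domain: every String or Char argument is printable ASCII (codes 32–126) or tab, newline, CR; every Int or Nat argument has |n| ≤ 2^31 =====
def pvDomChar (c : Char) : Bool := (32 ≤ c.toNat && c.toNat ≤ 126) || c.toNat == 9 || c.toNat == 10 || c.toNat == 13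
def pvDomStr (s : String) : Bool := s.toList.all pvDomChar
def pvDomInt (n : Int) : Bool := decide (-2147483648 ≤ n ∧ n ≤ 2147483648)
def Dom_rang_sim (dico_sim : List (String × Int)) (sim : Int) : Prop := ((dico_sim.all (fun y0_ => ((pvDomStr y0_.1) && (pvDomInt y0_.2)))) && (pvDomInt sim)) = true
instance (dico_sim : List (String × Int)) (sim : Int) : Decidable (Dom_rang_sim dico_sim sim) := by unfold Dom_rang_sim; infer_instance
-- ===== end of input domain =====

-- B replaces A's sort-then-scan by a single counting pass (rank = #greater + #equal, 0 if none equal); objective: faster.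


-- ===== PORT A =====
-- sorted(dico_sim.items(), key=lambda t: t[1], reverse=True), then scan .values() keeping the last position equal to sim
def rang_sim (dico_sim : List (String × Int)) (sim : Int) : Int :=
  let dico_sim_sorted := PySem.List.sorted dico_sim (fun t => t.2) true
  let st := dico_sim_sorted.foldl
    (fun (st : Int × Int) elt =>
      (st.1 + 1, if elt.2 = sim then st.1 else st.2))
    (1, 0)
  st.2

-- ===== PORT B =====
-- one pass counting values greater than / equal to sim
def rang_sim_alt (dico_sim : List (String × Int)) (sim : Int) : Int :=
  let st := dico_sim.foldl
    (fun (st : Int × Int) v =>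
      if sim < v.2 then (st.1 + 1, st.2)
      else if v.2 = sim then (st.1, st.2 + 1)
      else st)
    (0, 0)
  if st.2 ≠ 0 then st.1 + st.2 else 0

-- ===== PRECONDITION & SPEC =====
def Spec_rang_sim (dico_sim : List (String × Int)) (sim : Int) (out : Int) : Prop := out = rang_sim_alt dico_sim sim
instance (dico_sim : List (String × Int)) (sim : Int) (out : Int) : Decidable (Spec_rang_sim dico_sim sim out) := by unfold Spec_rang_sim; infer_instance

-- ===== CLAIM (what is proved, stated in full; the proofs are below) =====
def Claim_equal_rang_sim : Prop := ∀ (dico_sim : List (String × Int)) (sim : Int), Dom_rang_sim dico_sim sim → Spec_rang_sim dico_sim sim (rang_sim dico_sim sim)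

-- ===== LEMMAS AND PROOFS =====

-- number of values strictly greater than sim / equal to sim
def pvG (sim : Int) (l : List (String × Int)) : Nat := l.countP (fun p => decide (sim < p.2))
def pvE (sim : Int) (l : List (String × Int)) : Nat := l.countP (fun p => decide (p.2 = sim))

-- A's scan over a value-descending list: final rang = etape₀ + g + e - 1 if any value equals sim, else rang₀
theorem foldA_char (sim : Int) (l : List (String × Int))
    (h : l.Pairwise (fun a b => b.2 ≤ a.2)) (etape rang : Int) :
    (l.foldl (fun (st : Int × Int) elt =>
        (st.1 + 1, if elt.2 = sim then st.1 else st.2)) (etape, rang)).2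
      = if 0 < pvE sim l then etape + pvG sim l + pvE sim l - 1 else rang := by
  induction l generalizing etape rang with
  | nil => simp [pvE]
  | cons x t ih =>
    rcases List.pairwise_cons.mp h with ⟨hx, ht⟩
    simp only [List.foldl_cons]
    rw [ih ht]
    rcases lt_trichotomy x.2 sim with hlt | heq | hgt
    · have he : pvE sim t = 0 := by
        rw [pvE, List.countP_eq_zero]
        intro p hp
        have := hx p hp
        simp only [decide_eq_true_eq]
        omega
      have he' : pvE sim (x :: t) = 0 := by
        rw [pvE, List.countP_cons_of_neg (by simp only [decide_eq_true_eq]; omega)]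
        exact he
      rw [he, he']
      simp [show ¬ x.2 = sim by omega]
    · have hg : pvG sim t = 0 := by
        rw [pvG, List.countP_eq_zero]
        intro p hp
        have := hx p hp
        simp only [decide_eq_true_eq]
        omega
      have hg' : pvG sim (x :: t) = 0 := by
        rw [pvG, List.countP_cons_of_neg (by simp only [decide_eq_true_eq]; omega)]
        exact hg
      have he' : pvE sim (x :: t) = pvE sim t + 1 := by
        simp [pvE, heq]
      rw [if_pos heq, he', hg', hg]
      by_cases h0 : 0 < pvE sim t
      · rw [if_pos h0, if_pos (by omega)]
        omega
      · rw [if_neg h0, if_pos (by omega)]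
        omega
    · have hg' : pvG sim (x :: t) = pvG sim t + 1 := by
        simp [pvG, hgt]
      have he' : pvE sim (x :: t) = pvE sim t := by
        simp [pvE, show ¬ x.2 = sim by omega]
      rw [if_neg (show ¬ x.2 = sim by omega), hg', he']
      by_cases h0 : 0 < pvE sim t
      · rw [if_pos h0, if_pos h0]; omega
      · rw [if_neg h0, if_neg h0]
    
-- B's single pass accumulates exactly the two counts
theorem foldB_char (sim : Int) (l : List (String × Int)) (a b : Int) :
    l.foldl (fun (st : Int × Int) v =>
      if sim < v.2 then (st.1 + 1, st.2)
      else if v.2 = sim then (st.1, st.2 + 1)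
      else st) (a, b) = (a + (pvG sim l : Int), b + (pvE sim l : Int)) := by
  induction l generalizing a b with
  | nil => simp [pvG, pvE]
  | cons x t ih =>
    simp only [List.foldl_cons]
    rcases lt_trichotomy x.2 sim with hlt | heq | hgt
    · rw [if_neg (by omega), if_neg (by omega), ih]
      simp [pvG, pvE, show ¬ sim < x.2 by omega, show ¬ x.2 = sim by omega]
    · rw [if_neg (by omega), if_pos heq, ih]
      have hg : pvG sim (x :: t) = pvG sim t := by
        simp [pvG, show ¬ sim < x.2 by omega]
      have he : pvE sim (x :: t) = pvE sim t + 1 := by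
        simp [pvE, heq]
      rw [hg, he]
      simp only [Prod.mk.injEq, true_and, and_true]
      push_cast
      omega
    · rw [if_pos hgt, ih]
      have hg : pvG sim (x :: t) = pvG sim t + 1 := by
        simp [pvG, hgt]
      have he : pvE sim (x :: t) = pvE sim t := by
        simp [pvE, show ¬ x.2 = sim by omega]
      rw [hg, he]
      simp only [Prod.mk.injEq, true_and, and_true]
      push_cast
      omega

-- ===== VERDICT (by name: the statement is the Claim_ definition above) =====
theorem rang_sim_spec : Claim_equal_rang_sim := by
  intro dico_sim sim _
  unfold Spec_rang_sim rang_sim rang_sim_alt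
  have hperm : (PySem.List.sorted dico_sim (fun t => t.2) true).Perm dico_sim :=
    PySem.List.sorted_perm ..
  have hG : pvG sim (PySem.List.sorted dico_sim (fun t => t.2) true) = pvG sim dico_sim :=
    hperm.countP_eq _
  have hE : pvE sim (PySem.List.sorted dico_sim (fun t => t.2) true) = pvE sim dico_sim :=
    hperm.countP_eq _
  rw [foldA_char sim _ (PySem.List.sorted_pairwise_rev ..) 1 0, foldB_char, hG, hE]
  simp only [zero_add]
  by_cases h0 : 0 < pvE sim dico_sim
  · rw [if_pos h0, if_pos (by push_cast; omega)]
    push_cast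
    ring
  · rw [if_neg h0, if_neg (by push_cast; omega)]
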